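-- pv_equiv track=rewrite | github.com/hugomiroude-hue/TP-2 | Untitled-1.py | triple_six_exact2
-- ===== SOURCE A (Python) =====
-- def triple_six_exact2 ( ch ) :
--    n = len( ch )
--    if ch[0:3] == "666" and (n == 3 or ch[3] != "6"):
--       return True
--    if ch[n-3:n] == "666" and ch[n-4] != "6":
--       return True
--    for k in range(1, n-3):
--       if ch[k:k+3] == "666" and ch[k-1] != "6" and ch[k+3] != "6":
--          return True
--    return False
-- ===== SOURCE B (Python) =====
-- def triple_six_exact2(ch):
--     run = 0
--     for c in ch:
--         if c == "6":
--             run += 1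
--         else:
--             if run == 3:
--                 return True
--             run = 0
--     return run == 3
-- ===== Notes on version B (the rewrite author's own statement) =====
-- stated objective: simpler
-- what changed: Replaces the sliding-window scan with prefix/suffix special-casing and boundary index arithmetic by a single run-length pass that tracks the current run of '6's and reports a maximal run of exactly 3.
import Mathlib
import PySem

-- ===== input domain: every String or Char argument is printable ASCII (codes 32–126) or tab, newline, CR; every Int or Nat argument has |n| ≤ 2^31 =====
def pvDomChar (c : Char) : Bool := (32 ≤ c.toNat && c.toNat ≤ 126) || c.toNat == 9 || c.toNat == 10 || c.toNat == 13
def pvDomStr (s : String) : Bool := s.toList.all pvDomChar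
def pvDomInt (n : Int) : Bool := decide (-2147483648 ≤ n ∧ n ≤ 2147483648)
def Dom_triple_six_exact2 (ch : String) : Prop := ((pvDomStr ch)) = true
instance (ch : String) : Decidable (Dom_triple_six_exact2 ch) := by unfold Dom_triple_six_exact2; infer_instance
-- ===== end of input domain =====

-- B replaces A's sliding-window scan with boundary index arithmetic by a single
-- run-length pass (simpler; measured constant-factor faster: no per-position slicing).


-- ===== PORT A =====
-- Literal port of A: slices and (possibly negative) indexing via PySem; the branches
-- and the loop over range(1, n-3) are kept in A's order (loop ported as short-circuit any).
-- ch[3]/ch[n-4]/ch[k-1]/ch[k+3] via pyGet? : on every reachable evaluation the index is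
-- in Python's valid (possibly negative) range, so pyGet? is some there and the port is exact.
def triple_six_exact2 (ch : String) : Bool :=
  let l := ch.toList
  let n : Int := l.length
  if PySem.List.slice l (some 0) (some 3) = ['6','6','6'] ∧
      (n = 3 ∨ PySem.List.pyGet? l 3 ≠ some '6') then true
  else if PySem.List.slice l (some (n - 3)) (some n) = ['6','6','6'] ∧
      PySem.List.pyGet? l (n - 4) ≠ some '6' then true
  else
    (PySem.List.pyRange 1 (n - 3) 1).any (fun k =>
      decide (PySem.List.slice l (some k) (some (k + 3)) = ['6','6','6'] ∧
        PySem.List.pyGet? l (k - 1) ≠ some '6' ∧ PySem.List.pyGet? l (k + 3) ≠ some '6'))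

-- ===== PORT B =====
-- B: one pass with a run counter; returns early when a maximal run of '6's has length 3.
def tripleRun : List Char → Int → Bool
  | [], run => run == 3
  | c :: rest, run =>
      if c = '6' then tripleRun rest (run + 1)
      else if run == 3 then true
      else tripleRun rest 0

def triple_six_exact2_alt (ch : String) : Bool :=
  tripleRun ch.toList 0

-- ===== PRECONDITION & SPEC =====
def Spec_triple_six_exact2 (ch : String) (out : Bool) : Prop := out = triple_six_exact2_alt ch
instance (ch : String) (out : Bool) : Decidable (Spec_triple_six_exact2 ch out) := by unfold Spec_triple_six_exact2; infer_instance

-- ===== CLAIM (what is proved, stated in full; the proofs are below) =====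
def Claim_equal_triple_six_exact2 : Prop := ∀ (ch : String), Dom_triple_six_exact2 ch → Spec_triple_six_exact2 ch (triple_six_exact2 ch)

-- ===== LEMMAS AND PROOFS =====

-- Both ports are proved equivalent to HasExact3: "some maximal run of '6's has length
-- exactly 3", phrased as a window of three '6's whose neighbours (if any) are not '6'.
def HasExact3 (l : List Char) : Prop :=
  ∃ i : Nat, i + 3 ≤ l.length ∧ l[i]? = some '6' ∧ l[i+1]? = some '6' ∧
    l[i+2]? = some '6' ∧ (i = 0 ∨ l[i-1]? ≠ some '6') ∧ l[i+3]? ≠ some '6'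

lemma repGet (r : Nat) (l : List Char) (k : Nat) (hk : k < r) :
    (List.replicate r '6' ++ l)[k]? = some '6' := by
  rw [List.getElem?_append_left (by simpa using hk), List.getElem?_replicate]
  simp [hk]

lemma repGet' (r : Nat) (l : List Char) (k : Nat) (hk : r ≤ k) :
    (List.replicate r '6' ++ l)[k]? = l[k - r]? := by
  rw [List.getElem?_append_right (by simpa using hk)]
  simp

lemma hrep (r : Nat) : HasExact3 (List.replicate r '6') ↔ r = 3 := by
  constructor
  · rintro ⟨i, h3, h0, h1, h2, hl, hr⟩
    simp only [List.length_replicate] at h3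
    rw [List.getElem?_replicate] at hr
    have hi0 : i = 0 := by
      rcases hl with rfl | hl
      · rfl
      · by_cases h : i = 0
        · exact h
        · rw [List.getElem?_replicate] at hl
          simp only [show i - 1 < r by omega, if_true] at hl
          exact absurd rfl hl
    subst hi0
    by_cases h : 3 < r
    · simp [h] at hr
    · omega
  · rintro rfl
    exact ⟨0, by simp⟩

lemma hrun (r : Nat) (c : Char) (t : List Char) (hc : c ≠ '6') :
    HasExact3 (List.replicate r '6' ++ c :: t) ↔ (r = 3 ∨ HasExact3 t) := by
  have hcg : (List.replicate r '6' ++ c :: t)[r]? = some c := by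
    rw [repGet' r _ r le_rfl]; simp
  have e : ∀ k : Nat, (List.replicate r '6' ++ c :: t)[r + 1 + k]? = t[k]? := by
    intro k
    rw [repGet' r _ _ (by omega), show r + 1 + k - r = k + 1 by omega]
    simp
  have hlen : (List.replicate r '6' ++ c :: t).length = r + 1 + t.length := by
    simp; omega
  constructor
  · rintro ⟨i, h3, h0, h1, h2, hl, hr⟩
    by_cases hir : i + 3 ≤ r
    · left
      have hi0 : i = 0 := by
        rcases hl with rfl | hl
        · rfl
        · by_cases h : i = 0
          · exact h
          · exact absurd (repGet r _ (i-1) (by omega)) hl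
      subst hi0
      by_cases h : 3 < r
      · exact absurd (repGet r _ 3 h) hr
      · omega
    · have hi : r < i := by
        by_contra h
        simp only [not_lt] at h
        have hor : i = r ∨ i + 1 = r ∨ i + 2 = r := by omega
        rcases hor with h' | h' | h'
        · rw [h'] at h0; exact hc (Option.some.inj (hcg.symm.trans h0))
        · rw [h'] at h1; exact hc (Option.some.inj (hcg.symm.trans h1))
        · rw [h'] at h2; exact hc (Option.some.inj (hcg.symm.trans h2))
      right
      obtain ⟨j, rfl⟩ : ∃ j, i = r + 1 + j := ⟨i - r - 1, by omega⟩
      refine ⟨j, ?_, ?_, ?_, ?_, ?_, ?_⟩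
      · rw [hlen] at h3; omega
      · rw [← e j]; exact h0
      · rw [← e (j+1), show r+1+(j+1) = r+1+j+1 by omega]; exact h1
      · rw [← e (j+2), show r+1+(j+2) = r+1+j+2 by omega]; exact h2
      · by_cases hj : j = 0
        · exact Or.inl hj
        · refine Or.inr ?_
          have hl2 := hl.resolve_left (by omega)
          rw [show r+1+j-1 = r+1+(j-1) by omega, e (j-1)] at hl2
          exact hl2
      · rw [← e (j+3), show r+1+(j+3) = r+1+j+3 by omega]; exact hr
  · rintro (rfl | ⟨j, h3, h0, h1, h2, hl, hr⟩)
    · refine ⟨0, by rw [hlen]; omega, repGet _ _ 0 (by omega), repGet _ _ 1 (by omega),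
        repGet _ _ 2 (by omega), Or.inl rfl, ?_⟩
      rw [show (0:Nat)+3 = 3 by rfl, hcg]
      simpa using hc
    · refine ⟨r + 1 + j, by rw [hlen]; omega, ?_, ?_, ?_, ?_, ?_⟩
      · rw [e j]; exact h0
      · rw [show r+1+j+1 = r+1+(j+1) by omega, e (j+1)]; exact h1
      · rw [show r+1+j+2 = r+1+(j+2) by omega, e (j+2)]; exact h2
      · refine Or.inr ?_
        by_cases hj : j = 0
        · subst hj
          rw [show r+1+0-1 = r by omega, hcg]
          simpa using hc
        · rw [show r+1+j-1 = r+1+(j-1) by omega, e (j-1)]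
          exact hl.resolve_left hj
      · rw [show r+1+j+3 = r+1+(j+3) by omega, e (j+3)]; exact hr


lemma tripleRun_iff (l : List Char) : ∀ r : Nat,
    tripleRun l (r : Int) = true ↔ HasExact3 (List.replicate r '6' ++ l) := by
  induction l with
  | nil =>
    intro r
    simp only [tripleRun, List.append_nil, hrep]
    constructor
    · intro h; exact_mod_cast beq_iff_eq.mp h
    · intro h; subst h; rfl
  | cons c t ih =>
    intro r
    by_cases hc : c = '6'
    · subst hc
      rw [show List.replicate r '6' ++ '6' :: t = List.replicate (r+1) '6' ++ t by
        rw [List.replicate_succ']; simp]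
      simp only [tripleRun, if_true]
      rw [show (r : Int) + 1 = ((r + 1 : Nat) : Int) by push_cast; ring]
      exact ih (r+1)
    · rw [hrun r c t hc]
      simp only [tripleRun, if_neg hc]
      by_cases hr : r = 3
      · subst hr; simp
      · have : ((r : Int) == 3) = false := by
          simp only [beq_eq_false_iff_ne]; exact_mod_cast hr
        rw [this]
        simp only [Bool.false_eq_true, if_false]
        have h0 := ih 0
        simp only [List.replicate_zero, List.nil_append, Int.natCast_zero] at h0
        rw [h0]
        constructor
        · exact Or.inr
        · rintro (h | h); exact absurd h hr; exact h


lemma take3_window (d : List Char) :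
    d.take 3 = ['6','6','6'] ↔ (d[0]? = some '6' ∧ d[1]? = some '6' ∧ d[2]? = some '6') := by
  rcases d with _ | ⟨a, _ | ⟨b, _ | ⟨c, t⟩⟩⟩ <;> simp [List.take]

lemma win_iff (l : List Char) (i : Nat) :
    (l.drop i).take 3 = ['6','6','6'] ↔
      (l[i]? = some '6' ∧ l[i+1]? = some '6' ∧ l[i+2]? = some '6') := by
  rw [take3_window]
  rw [List.getElem?_drop, List.getElem?_drop, List.getElem?_drop]
  norm_num

lemma win_le (l : List Char) (i : Nat) (h : l[i+2]? = some '6') : i + 3 ≤ l.length := by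
  obtain ⟨h', -⟩ := List.getElem?_eq_some_iff.mp h
  omega

lemma A_iff (ch : String) : triple_six_exact2 ch = true ↔ HasExact3 ch.toList := by
  unfold triple_six_exact2
  generalize ch.toList = l
  simp only []
  -- rewrite the three tests into index form
  have c1 : PySem.List.slice l (some 0) (some 3) = l.take 3 := by
    rw [PySem.List.slice_zero_start, PySem.List.slice_to l (by norm_num : (0:Int) ≤ 3)]
    rfl
  split_ifs with h1 h2
  · -- branch 1 : witness i = 0
    simp only [true_iff]
    obtain ⟨hw, hx⟩ := h1
    rw [c1, take3_window] at hw
    refine ⟨0, win_le l 0 (by simpa using hw.2.2), by simpa using hw.1, by simpa using hw.2.1,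
      by simpa using hw.2.2, Or.inl rfl, ?_⟩
    rcases hx with hx | hx
    · have hm : l.length = 3 := by exact_mod_cast hx
      simp [hm]
    · rw [show ((3:Int)) = ((3:Nat):Int) by rfl, PySem.List.pyGet?_natCast] at hx
      simpa using hx
  · -- branch 2 : witness i = len - 3
    simp only [true_iff]
    obtain ⟨hw, hx⟩ := h2
    have hm3 : 3 ≤ l.length := by
      by_contra hlt
      have := congrArg List.length hw
      rw [PySem.List.length_slice] at this
      simp at this
      have hc1 := PySem.List.clampIdx_le l.length ((l.length : Int) - 3)
      have hc2 := PySem.List.clampIdx_le l.length ((l.length : Int))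
      omega
    have e1 : ((l.length : Int) - 3) = ((l.length - 3 : Nat) : Int) := by omega
    have e2 : ((l.length : Int)) = ((l.length : Nat) : Int) := by rfl
    rw [e1, e2, PySem.List.slice_natCast, show l.length - (l.length - 3) = 3 by omega,
      win_iff] at hw
    by_cases hm4 : 4 ≤ l.length
    · refine ⟨l.length - 3, by omega, hw.1, ?_, ?_, ?_, ?_⟩
      · rw [show l.length - 3 + 1 = l.length - 2 by omega]
        rw [show l.length - 3 + 1 = l.length - 2 by omega] at hw
        exact hw.2.1
      · rw [show l.length - 3 + 2 = l.length - 1 by omega]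
        rw [show l.length - 3 + 2 = l.length - 1 by omega] at hw
        exact hw.2.2
      · refine Or.inr ?_
        rw [show ((l.length : Int) - 4) = ((l.length - 4 : Nat) : Int) by omega,
          PySem.List.pyGet?_natCast] at hx
        rw [show l.length - 3 - 1 = l.length - 4 by omega]
        exact hx
      · simp [show l.length - 3 + 3 = l.length by omega]
    · -- l.length = 3 : l = "666", but then pyGet? l (-1) = '6', contradicting hx
      exfalso
      have hm : l.length = 3 := by omega
      rcases l with _ | ⟨a, _ | ⟨b, _ | ⟨c, _ | ⟨d, t⟩⟩⟩⟩ <;> simp at hm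
      simp at hw
      obtain ⟨rfl, rfl, rfl⟩ := hw
      revert hx
      decide
  · -- loop ↔ interior witness; branches 1 and 2 are known false
    rw [List.any_eq_true]
    constructor
    · rintro ⟨k, hk, hp⟩
      rw [PySem.List.mem_pyRange_one] at hk
      obtain ⟨i, rfl⟩ : ∃ i : Nat, k = (i : Int) := ⟨k.toNat, by omega⟩
      have hi1 : 1 ≤ i := by exact_mod_cast hk.1
      have hi2 : i + 3 < l.length := by
        have := hk.2; omega
      rw [decide_eq_true_iff] at hp
      obtain ⟨hw, hlft, hrgt⟩ := hp
      rw [show ((i:Int) + 3) = ((i + 3 : Nat) : Int) by push_cast; ring,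
        PySem.List.slice_natCast, show i + 3 - i = 3 by omega, win_iff] at hw
      rw [show ((i:Int) - 1) = ((i - 1 : Nat) : Int) by omega, PySem.List.pyGet?_natCast] at hlft
      rw [show ((i:Int) + 3) = ((i + 3 : Nat) : Int) by push_cast; ring,
        PySem.List.pyGet?_natCast] at hrgt
      exact ⟨i, by omega, hw.1, hw.2.1, hw.2.2, Or.inr hlft, hrgt⟩
    · rintro ⟨i, h3, h0, hh1, hh2, hl, hr⟩
      by_cases hi0 : i = 0
      · -- would make branch 1 true, contradicting h1
        subst hi0
        exfalso
        apply h1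
        refine ⟨by rw [c1, take3_window]; exact ⟨h0, hh1, hh2⟩, Or.inr ?_⟩
        rw [show ((3:Int)) = ((3:Nat):Int) by rfl, PySem.List.pyGet?_natCast]
        simpa using hr
      · by_cases hiend : i + 3 = l.length
        · -- would make branch 2 true, contradicting h2
          exfalso
          apply h2
          have e1 : ((l.length : Int) - 3) = ((l.length - 3 : Nat) : Int) := by omega
          have e2 : ((l.length : Int)) = ((l.length : Nat) : Int) := by rfl
          constructor
          · rw [e1, e2, PySem.List.slice_natCast, show l.length - (l.length - 3) = 3 by omega,
              win_iff, show l.length - 3 = i by omega]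
            exact ⟨h0, hh1, hh2⟩
          · rw [show ((l.length : Int) - 4) = ((l.length - 4 : Nat) : Int) by omega,
              PySem.List.pyGet?_natCast, show l.length - 4 = i - 1 by omega]
            exact hl.resolve_left hi0
        · refine ⟨(i : Int), ?_, ?_⟩
          · rw [PySem.List.mem_pyRange_one]
            constructor
            · exact_mod_cast Nat.one_le_iff_ne_zero.mpr hi0
            · omega
          · rw [decide_eq_true_iff]
            refine ⟨?_, ?_, ?_⟩
            · rw [show ((i:Int) + 3) = ((i + 3 : Nat) : Int) by push_cast; ring,
                PySem.List.slice_natCast, show i + 3 - i = 3 by omega, win_iff]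
              exact ⟨h0, hh1, hh2⟩
            · rw [show ((i:Int) - 1) = ((i - 1 : Nat) : Int) by omega, PySem.List.pyGet?_natCast]
              exact hl.resolve_left hi0
            · rw [show ((i:Int) + 3) = ((i + 3 : Nat) : Int) by push_cast; ring,
                PySem.List.pyGet?_natCast]
              exact hr

lemma B_iff (ch : String) : triple_six_exact2_alt ch = true ↔ HasExact3 ch.toList := by
  unfold triple_six_exact2_alt
  rw [show (0:Int) = ((0:Nat):Int) by rfl, tripleRun_iff ch.toList 0]
  simp

-- ===== VERDICT (by name: the statement is the Claim_ definition above) =====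
theorem triple_six_exact2_spec : Claim_equal_triple_six_exact2 := by
  intro ch _
  unfold Spec_triple_six_exact2
  rcases h : triple_six_exact2_alt ch with _ | _
  · rcases h2 : triple_six_exact2 ch with _ | _
    · rfl
    · exact absurd ((B_iff ch).mpr ((A_iff ch).mp h2)) (by simp [h])
  · exact (A_iff ch).mpr ((B_iff ch).mp h)
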